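-- pv_equiv track=rewrite | github.com/DimaShevchenkoo/4MP | lab 8.py | func
-- ===== SOURCE A (Python) =====
-- def func(y, j):
--     masiv = []
--     for i in range(len(y)):
--         masiv.append(y[i] - y[i - 1])
--     masiv.pop(0)
--     if j == 1:
--         return masiv
--     else:
--         j -= 1
--         return func(masiv, j)
-- ===== SOURCE B (Python) =====
-- def func(y, j):
--     cur = list(y)
--     while True:
--         prev = cur.pop(0)   # nothing left to difference -> IndexError, as in the recursive version
--         nxt = []
--         for v in cur:
--             nxt.append(v - prev)
--             prev = v
--         if j == 1:
--             return nxt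
--         j -= 1
--         cur = nxt
-- ===== Notes on version B (the rewrite author's own statement) =====
-- stated objective: alternative
-- what changed: The recursion that index-builds wraparound differences (y[i]-y[i-1], including y[0]-y[-1]) and then pops the spurious first element is replaced by an iterative while-loop whose inner pass differences each element against a running previous value with no list indexing at all (pop(0) of the head is the natural initial previous and raises the same IndexError on exhaustion).
import Mathlib
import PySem

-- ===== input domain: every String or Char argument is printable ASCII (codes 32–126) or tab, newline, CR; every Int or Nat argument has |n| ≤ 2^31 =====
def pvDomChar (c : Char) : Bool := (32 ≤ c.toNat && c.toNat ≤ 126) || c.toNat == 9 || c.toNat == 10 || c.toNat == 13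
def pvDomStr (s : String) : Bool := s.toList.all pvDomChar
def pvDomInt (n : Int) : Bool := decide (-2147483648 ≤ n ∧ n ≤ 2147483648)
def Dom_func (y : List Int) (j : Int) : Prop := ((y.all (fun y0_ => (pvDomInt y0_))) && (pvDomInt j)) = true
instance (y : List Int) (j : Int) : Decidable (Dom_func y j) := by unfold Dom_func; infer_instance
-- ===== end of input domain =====

-- B replaces A's recursion (index-built wraparound differences y[i]-y[i-1], then pop(0)) by an
-- iterative loop that differences against a running previous element, with no indexing at all.

-- ===== PORT A =====
-- literal port of A: build masiv = [y[i]-y[i-1] for i in range(len y)] (i=0 wraps to y[-1]),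
-- pop(0) (IndexError on empty y, excluded by Pre_; the port returns [] there), then the j==1 test.
def func (y : List Int) (j : Int) : List Int :=
  match h : (List.range y.length).foldl
      (fun m (i : Nat) => m ++ [PySem.List.pyGetD y (i : Int) 0 - PySem.List.pyGetD y ((i : Int) - 1) 0]) [] with
  | [] => []   -- Python raises IndexError here (pop(0) from the empty list); outside Pre_
  | _ :: rest =>
    if j == 1 then rest
    else func rest (j - 1)
termination_by y.length
decreasing_by
  have hlen : ((List.range y.length).foldl
      (fun m (i : Nat) => m ++ [PySem.List.pyGetD y (i : Int) 0 - PySem.List.pyGetD y ((i : Int) - 1) 0]) []).length = y.length := by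
    rw [PySem.List.foldl_append_singleton_eq_map]
    simp
  rw [h] at hlen
  simp at hlen
  omega

-- ===== PORT B =====
-- port of B:  while True: prev = cur.pop(0); nxt = []; for v in cur: nxt.append(v - prev); prev = v;
--             if j == 1: return nxt; j -= 1; cur = nxt
-- funcB_pass is the inner for-loop (running previous element, no indexing)
def funcB_pass (prev : Int) (cur : List Int) : List Int :=
  (cur.foldl (fun (s : List Int × Int) v => (s.1 ++ [v - s.2], v)) ([], prev)).1

-- length of one pass (cited by decreasing_by)
theorem funcB_pass_length (prev : Int) (cur : List Int) :
    (funcB_pass prev cur).length = cur.length := by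
  unfold funcB_pass
  induction cur generalizing prev with
  | nil => rfl
  | cons v vs ih =>
    rw [List.foldl_cons]
    have h : ∀ (l : List Int) (acc : List Int) (p : Int),
        ((l.foldl (fun (s : List Int × Int) v => (s.1 ++ [v - s.2], v)) (acc, p)).1).length
          = acc.length + l.length := by
      intro l
      induction l with
      | nil => simp
      | cons w ws ihw => intro acc p; rw [List.foldl_cons, ihw]; simp; omega
    rw [h]
    simp
    omega

def func_alt (y : List Int) (j : Int) : List Int :=
  match y with
  | [] => []   -- Python raises IndexError here (cur.pop(0) on the empty list); outside Pre_
  | prev :: cur =>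
    let nxt := funcB_pass prev cur
    if j == 1 then nxt
    else func_alt nxt (j - 1)
termination_by y.length
decreasing_by
  rw [funcB_pass_length]
  simp

-- ===== PRECONDITION & SPEC =====
-- Pre_ = exactly the inputs where the Pythons return: both raise IndexError whenever j < 1
-- (the j==1 test never fires and the list is differenced down to empty) or j > len y.
def Pre_func (y : List Int) (j : Int) : Prop := 1 ≤ j ∧ j ≤ (y.length : Int)
instance (y : List Int) (j : Int) : Decidable (Pre_func y j) := by unfold Pre_func; infer_instance
def pvWitness_func : List Int × Int := ([3, 1, 4, 1, 5], 2)

def Spec_func (y : List Int) (j : Int) (out : List Int) : Prop := out = func_alt y j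
instance (y : List Int) (j : Int) (out : List Int) : Decidable (Spec_func y j out) := by unfold Spec_func; infer_instance

-- ===== CLAIM (what is proved, stated in full; the proofs are below) =====
def Claim_equal_func : Prop := ∀ (y : List Int) (j : Int), Dom_func y j → Pre_func y j → Spec_func y j (func y j)

-- ===== LEMMAS AND PROOFS =====

-- successive differences against a running previous element (the clean value both ports produce)
def pdiffs : Int → List Int → List Int
  | _, [] => []
  | p, v :: vs => (v - p) :: pdiffs v vs

theorem length_pdiffs (p : Int) (l : List Int) : (pdiffs p l).length = l.length := by
  induction l generalizing p with
  | nil => rfl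
  | cons v vs ih => simp [pdiffs, ih]

-- B's inner loop computes acc ++ pdiffs p l
theorem funcB_fold_eq (l : List Int) (acc : List Int) (p : Int) :
    (l.foldl (fun (s : List Int × Int) v => (s.1 ++ [v - s.2], v)) (acc, p)).1
      = acc ++ pdiffs p l := by
  induction l generalizing acc p with
  | nil => simp [pdiffs]
  | cons v vs ih => rw [List.foldl_cons, ih]; simp [pdiffs]

theorem funcB_pass_eq (prev : Int) (cur : List Int) :
    funcB_pass prev cur = pdiffs prev cur := by
  unfold funcB_pass
  rw [funcB_fold_eq]
  simp

theorem funcB_cons (a : Int) (ys : List Int) (j : Int) :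
    func_alt (a :: ys) j = if j == 1 then pdiffs a ys else func_alt (pdiffs a ys) (j - 1) := by
  rw [func_alt]
  rw [funcB_pass_eq]

-- indexing shifted past a cons cell, in List.getD form
theorem pyGetD_cast_add_one (xs : List Int) (n : Nat) (d : Int) :
    PySem.List.pyGetD xs ((n : Int) + 1) d = xs.getD (n + 1) d := by
  rw [show ((n : Int) + 1) = ((n + 1 : Nat) : Int) by push_cast; ring,
      PySem.List.pyGetD_natCast]

-- the forward-difference comprehension entries, as pdiffs
theorem map_range_getD_eq_pdiffs (a : Int) (ys : List Int) :
    (List.range ys.length).map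
      (fun (i : Nat) => (a :: ys).getD (i + 1) 0 - (a :: ys).getD i 0) = pdiffs a ys := by
  induction ys generalizing a with
  | nil => rfl
  | cons b ys ih =>
    rw [show (b :: ys).length = ys.length + 1 from rfl, List.range_succ_eq_map,
        List.map_cons, List.map_map]
    refine congrArg₂ List.cons ?_ ?_
    · simp
    · rw [← ih b]
      apply List.map_congr_left
      intro i _
      simp [Function.comp, Nat.succ_eq_add_one]

-- A's masiv, for nonempty y, is (y[0]-y[-1]) :: pdiffs y[0] (tail y)
theorem masivA_eq (a : Int) (ys : List Int) :
    (List.range (a :: ys).length).foldl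
      (fun m (i : Nat) => m ++ [PySem.List.pyGetD (a :: ys) (i : Int) 0
                        - PySem.List.pyGetD (a :: ys) ((i : Int) - 1) 0]) []
    = (a - PySem.List.pyGetD (a :: ys) (-1) 0) :: pdiffs a ys := by
  rw [PySem.List.foldl_append_singleton_eq_map]
  rw [show (a :: ys).length = ys.length + 1 from rfl, List.range_succ_eq_map,
      List.map_cons, List.map_map]
  refine congrArg₂ List.cons ?_ ?_
  · norm_num [PySem.List.pyGetD_zero_cons]
  · rw [← map_range_getD_eq_pdiffs a ys]
    apply List.map_congr_left
    intro i _
    simp only [Function.comp_apply, Nat.succ_eq_add_one]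
    have e1 : ((i + 1 : Nat) : Int) = (i : Int) + 1 := by push_cast; ring
    have e2 : ((i : Int) + 1 - 1) = (i : Int) := by ring
    rw [e1, e2, pyGetD_cast_add_one, PySem.List.pyGetD_natCast]

theorem funcA_cons (a : Int) (ys : List Int) (j : Int) :
    func (a :: ys) j = if j == 1 then pdiffs a ys else func (pdiffs a ys) (j - 1) := by
  rw [func]
  rw [masivA_eq]

theorem func_eq_alt (n : Nat) (y : List Int) (hn : 1 ≤ n) (hlen : n ≤ y.length) :
    func y (n : Int) = func_alt y (n : Int) := by
  induction n generalizing y with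
  | zero => omega
  | succ k ih =>
    cases y with
    | nil => simp at hlen
    | cons a ys =>
      rw [funcA_cons, funcB_cons]
      by_cases hk : k = 0
      · subst hk
        have hb : (((0 + 1 : Nat) : Int) == 1) = true := by norm_num
        rw [hb]
        simp
      · have hb : (((k + 1 : Nat) : Int) == 1) = false := by
          simp only [beq_eq_false_iff_ne, ne_eq]
          intro h
          omega
        rw [hb, if_neg (by simp), if_neg (by simp)]
        have harg : ((k + 1 : Nat) : Int) - 1 = (k : Int) := by push_cast; ring
        rw [harg]
        apply ih
        · omega
        · rw [length_pdiffs]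
          simp only [List.length_cons] at hlen
          omega

-- ===== VERDICT (by name: the statement is the Claim_ definition above) =====
theorem func_spec : Claim_equal_func := by
  intro y j _ hpre
  unfold Spec_func
  obtain ⟨h1, h2⟩ := hpre
  have hj : j = (j.toNat : Int) := (Int.toNat_of_nonneg (by omega)).symm
  rw [hj]
  exact func_eq_alt j.toNat y (by omega) (by omega)
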